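-- pv_equiv track=rewrite | github.com/JameRoyar/LeetCode | 3480DP2024D-抢7游戏.py | count_combinations
-- ===== SOURCE A (Python) =====
-- def count_combinations(m):
--     """
--     计算B获胜的总方案数
--     Args:
--         m: 初始数字
--     Returns:
--         B获胜的总方案数
--     """
--     # 初始化阶乘数组，Python中可以直接使用math.factorial()函数
--     # 这里为了与Java代码保持一致，也使用数组存储阶乘
--     factorial = [1]
--     for i in range(1, m - 6):  # 只需要计算到m-7的阶乘
--         factorial.append(factorial[-1] * i)
--
--     one_count = m - 7  # 初始的1的数量
--     two_count = 0  # 初始的2的数量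
--     total_count = 0
--
--     # 遍历所有可能的1和2的组合
--     while one_count >= 0:
--         # 当总步数为奇数时，B才能赢
--         if (one_count + two_count) % 2 != 0:
--             # 计算当前组合的排列数，并加到总数中
--             total_count += factorial[one_count + two_count] // (factorial[one_count] * factorial[two_count])
--         # 将两个1合并为一个2
--         one_count -= 2
--         two_count += 1
--
--     return total_count
-- ===== SOURCE B (Python) =====
-- def count_combinations(m):
--     # B wins iff the game takes an odd number of steps; the answer is the number
--     # of odd-length compositions of m-7 into parts 1 and 2.  Closed form:
--     # (F(n+1) - s(n)) / 2 where F is Fibonacci (computed by fast doubling) and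
--     # s(n) = 1, -1, 0 for n % 3 = 0, 1, 2.
--     n = m - 7
--     if n < 0:
--         return 0
--     total = _fib_pair(n + 1)[0]
--     r = n % 3
--     s = 1 if r == 0 else (-1 if r == 1 else 0)
--     return (total - s) // 2
--
--
-- def _fib_pair(k):
--     """Fast doubling: returns (F(k), F(k+1))."""
--     if k <= 0:
--         return (0, 1)
--     a, b = _fib_pair(k // 2)
--     c = a * (2 * b - a)
--     d = a * a + b * b
--     if k % 2 == 0:
--         return (c, d)
--     else:
--         return (d, c + d)
-- ===== Notes on version B (the rewrite author's own statement) =====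
-- stated objective: faster
-- what changed: A builds a factorial table and sums parity-restricted binomial coefficients with bignum divisions; B evaluates a closed form: half of the difference between a Fibonacci number (computed by fast doubling) and a period-three sign determined by the remainder of n modulo three.
import Mathlib
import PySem

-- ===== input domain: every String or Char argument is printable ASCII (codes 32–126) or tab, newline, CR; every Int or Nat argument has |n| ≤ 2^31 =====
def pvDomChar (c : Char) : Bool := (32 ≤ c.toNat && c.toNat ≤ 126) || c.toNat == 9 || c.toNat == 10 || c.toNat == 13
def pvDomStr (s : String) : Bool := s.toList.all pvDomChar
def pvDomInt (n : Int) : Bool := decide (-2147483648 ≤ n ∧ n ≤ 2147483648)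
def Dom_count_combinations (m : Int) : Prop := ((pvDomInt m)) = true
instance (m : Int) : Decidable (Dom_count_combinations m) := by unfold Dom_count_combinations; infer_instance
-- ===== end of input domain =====

-- B replaces A's factorial-table binomial summation by a closed form evaluated with
-- fast-doubling Fibonacci numbers (objective: faster; different algorithm).

-- ===== PORT A =====
-- the while loop: one_count decreases by 2 while ≥ 0; the factorial[...] indices are
-- always ≥ 0 and < len(factorial) during the loop, so pyGetD _ _ 0 is exact here
def pvLoopA (factorial : List Int) (oneCount twoCount totalCount : Int) : Int :=
  if _h : 0 ≤ oneCount then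
    let totalCount' :=
      if PySem.Int.mod (oneCount + twoCount) 2 ≠ 0 then
        totalCount + PySem.Int.floordiv (PySem.List.pyGetD factorial (oneCount + twoCount) 0)
          (PySem.List.pyGetD factorial oneCount 0 * PySem.List.pyGetD factorial twoCount 0)
      else totalCount
    pvLoopA factorial (oneCount - 2) (twoCount + 1) totalCount'
  else totalCount
termination_by (oneCount + 2).toNat
decreasing_by omega

def count_combinations (m : Int) : Int :=
  -- factorial.append(factorial[-1] * i); the list is always nonempty so index -1 is in range
  let factorial := (PySem.List.pyRange 1 (m - 6) 1).foldl
    (fun acc i => acc ++ [PySem.List.pyGetD acc (-1) 0 * i]) [1]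
  pvLoopA factorial (m - 7) 0 0

-- ===== PORT B =====
-- fast doubling: returns (F(k), F(k+1))
def pvFibPair (k : Int) : Int × Int :=
  if _h : k ≤ 0 then (0, 1)
  else
    let p := pvFibPair (PySem.Int.floordiv k 2)
    let a := p.1
    let b := p.2
    let c := a * (2 * b - a)
    let d := a * a + b * b
    if PySem.Int.mod k 2 = 0 then (c, d) else (d, c + d)
termination_by k.toNat
decreasing_by
  rw [PySem.Int.floordiv_eq_ediv_of_pos (by omega)]
  omega

def count_combinations_alt (m : Int) : Int :=
  let n := m - 7
  if n < 0 then 0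
  else
    let total := (pvFibPair (n + 1)).1
    let r := PySem.Int.mod n 3
    let s : Int := if r = 0 then 1 else if r = 1 then -1 else 0
    PySem.Int.floordiv (total - s) 2

-- ===== PRECONDITION & SPEC =====
def Spec_count_combinations (m : Int) (out : Int) : Prop := out = count_combinations_alt m
instance (m : Int) (out : Int) : Decidable (Spec_count_combinations m out) := by unfold Spec_count_combinations; infer_instance

-- ===== CLAIM (what is proved, stated in full; the proofs are below) =====
def Claim_equal_count_combinations : Prop := ∀ (m : Int), Dom_count_combinations m → Spec_count_combinations m (count_combinations m)

-- ===== LEMMAS AND PROOFS =====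

-- the sum A's loop accumulates, as a structural recursion (oc = one_count, tc = two_count)
def pvT : Nat → Nat → Nat
  | 0, tc => if tc % 2 = 1 then Nat.choose tc tc else 0
  | 1, tc => if (1 + tc) % 2 = 1 then (1 + tc).choose tc else 0
  | (oc+2), tc => (if (oc + 2 + tc) % 2 = 1 then (oc + 2 + tc).choose tc else 0) + pvT oc (tc + 1)

-- the same sum written as a Finset sum (generalized over the two_count offset)
def pvSoG (oc tc : Nat) : Nat :=
  ∑ j ∈ Finset.range (oc + 1), if (oc + tc - j) % 2 = 1 then (oc + tc - j).choose (tc + j) else 0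

-- number of odd-length 1/2-compositions of n (the quantity both programs compute)
def pvSoSum (n : Nat) : Nat :=
  ∑ j ∈ Finset.range (n + 1), if (n - j) % 2 = 1 then (n - j).choose j else 0

-- number of even-length 1/2-compositions of n
def pvSe (n : Nat) : Nat :=
  ∑ j ∈ Finset.range (n + 1), if (n - j) % 2 = 0 then (n - j).choose j else 0

def pvSgn (n : Nat) : Int := if n % 3 = 0 then 1 else if n % 3 = 1 then -1 else 0

lemma pvT_eq_soG (oc tc : Nat) : pvT oc tc = pvSoG oc tc := by
  induction oc using Nat.strong_induction_on generalizing tc with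
  | _ oc IH =>
    match oc with
    | 0 => simp [pvT, pvSoG]
    | 1 =>
      have h2 : tc.choose (tc + 1) = 0 := Nat.choose_eq_zero_of_lt (by omega)
      simp [pvT, pvSoG, Finset.sum_range_succ]
    | oc + 2 =>
      rw [pvT, IH oc (by omega) (tc + 1)]
      unfold pvSoG
      rw [Finset.sum_range_succ' (n := oc + 2)]
      have hterm0 : (if (oc + 2 + tc - 0) % 2 = 1 then (oc + 2 + tc - 0).choose (tc + 0) else 0)
          = (if (oc + 2 + tc) % 2 = 1 then (oc + 2 + tc).choose tc else 0) := by simp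
      rw [hterm0]
      rw [Nat.add_comm]
      congr 1
      conv_rhs => rw [Finset.sum_range_succ]
      have hlast : (if (oc + 2 + tc - (oc + 1 + 1)) % 2 = 1 then (oc + 2 + tc - (oc + 1 + 1)).choose (tc + (oc + 1 + 1)) else 0) = 0 := by
        have : oc + 2 + tc - (oc + 1 + 1) = tc := by omega
        rw [this]
        have : tc.choose (tc + (oc + 1 + 1)) = 0 := Nat.choose_eq_zero_of_lt (by omega)
        simp [this]
      rw [hlast, Nat.add_zero]
      apply Finset.sum_congr rfl
      intro j hj
      simp only [Finset.mem_range] at hj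
      have e1 : oc + 2 + tc - (j + 1) = oc + (tc + 1) - j := by omega
      have e2 : tc + (j + 1) = tc + 1 + j := by omega
      rw [e1, e2]

lemma pvSo_eq_sum (n : Nat) : pvSoG n 0 = pvSoSum n := by
  unfold pvSoG pvSoSum
  apply Finset.sum_congr rfl
  intro j hj
  simp

lemma pvSo_rec' (n : Nat) : pvSoSum (n + 2) = pvSe (n + 1) + pvSe n := by
  unfold pvSoSum pvSe
  rw [Finset.sum_range_succ' (n := n + 2)]
  have hsplit : ∀ k ∈ Finset.range (n + 2),
      (if (n + 2 - (k + 1)) % 2 = 1 then (n + 2 - (k + 1)).choose (k + 1) else 0)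
      = ((if (n - k) % 2 = 0 then (n - k).choose k else 0)
        + (if (n - k) % 2 = 0 then (n - k).choose (k + 1) else 0)) := by
    intro k hk
    simp only [Finset.mem_range] at hk
    rcases Nat.lt_or_ge k (n + 1) with hkn | hkn
    · have e1 : n + 2 - (k + 1) = (n - k) + 1 := by omega
      rw [e1, Nat.choose_succ_succ]
      have e2 : ((n - k) + 1) % 2 = 1 ↔ (n - k) % 2 = 0 := by omega
      by_cases hp : (n - k) % 2 = 0
      · rw [if_pos (e2.mpr hp), if_pos hp, if_pos hp]
      · rw [if_neg (fun h => hp (e2.mp h)), if_neg hp, if_neg hp]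
    · have hk1 : k = n + 1 := by omega
      subst hk1
      have e1 : n + 2 - (n + 1 + 1) = 0 := by omega
      have e2 : n - (n + 1) = 0 := by omega
      rw [e1, e2]
      simp [Nat.choose_eq_zero_of_lt]
  rw [Finset.sum_congr rfl hsplit, Finset.sum_add_distrib]
  rw [Finset.sum_range_succ (n := n + 1)
    (f := fun k => if (n - k) % 2 = 0 then (n - k).choose k else 0)]
  have hz1 : (if (n - (n + 1)) % 2 = 0 then (n - (n + 1)).choose (n + 1) else 0) = 0 := by
    have : n - (n + 1) = 0 := by omega
    simp [this, Nat.choose_eq_zero_of_lt]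
  rw [hz1, Nat.add_zero]
  rw [Finset.sum_range_succ (n := n + 1)
    (f := fun k => if (n - k) % 2 = 0 then (n - k).choose (k + 1) else 0)]
  have hz2 : (if (n - (n + 1)) % 2 = 0 then (n - (n + 1)).choose (n + 1 + 1) else 0) = 0 := by
    have : n - (n + 1) = 0 := by omega
    simp [this, Nat.choose_eq_zero_of_lt]
  rw [hz2, Nat.add_zero]
  rw [Finset.sum_range_succ' (n := n + 1)
    (f := fun j => if (n + 1 - j) % 2 = 0 then (n + 1 - j).choose j else 0)]
  have hcng : ∀ k ∈ Finset.range (n + 1),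
      (if (n + 1 - (k + 1)) % 2 = 0 then (n + 1 - (k + 1)).choose (k + 1) else 0)
      = (if (n - k) % 2 = 0 then (n - k).choose (k + 1) else 0) := by
    intro k hk
    have e : n + 1 - (k + 1) = n - k := by omega
    rw [e]
  rw [Finset.sum_congr rfl hcng]
  have hfz : (if (n + 2 - 0) % 2 = 1 then (n + 2 - 0).choose 0 else 0)
      = (if (n + 1 - 0) % 2 = 0 then (n + 1 - 0).choose 0 else 0) := by
    simp only [Nat.sub_zero, Nat.choose_zero_right]
    have : (n + 2) % 2 = 1 ↔ (n + 1) % 2 = 0 := by omega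
    by_cases hp : (n + 2) % 2 = 1
    · rw [if_pos hp, if_pos (this.mp hp)]
    · rw [if_neg hp, if_neg (fun h => hp (this.mpr h))]
  rw [hfz]
  ring

lemma pvSe_rec' (n : Nat) : pvSe (n + 2) = pvSoSum (n + 1) + pvSoSum n := by
  unfold pvSoSum pvSe
  rw [Finset.sum_range_succ' (n := n + 2)]
  have hsplit : ∀ k ∈ Finset.range (n + 2),
      (if (n + 2 - (k + 1)) % 2 = 0 then (n + 2 - (k + 1)).choose (k + 1) else 0)
      = ((if (n - k) % 2 = 1 then (n - k).choose k else 0)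
        + (if (n - k) % 2 = 1 then (n - k).choose (k + 1) else 0)) := by
    intro k hk
    simp only [Finset.mem_range] at hk
    rcases Nat.lt_or_ge k (n + 1) with hkn | hkn
    · have e1 : n + 2 - (k + 1) = (n - k) + 1 := by omega
      rw [e1, Nat.choose_succ_succ]
      have e2 : ((n - k) + 1) % 2 = 0 ↔ (n - k) % 2 = 1 := by omega
      by_cases hp : (n - k) % 2 = 1
      · rw [if_pos (e2.mpr hp), if_pos hp, if_pos hp]
      · rw [if_neg (fun h => hp (e2.mp h)), if_neg hp, if_neg hp]
    · have hk1 : k = n + 1 := by omega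
      subst hk1
      have e1 : n + 2 - (n + 1 + 1) = 0 := by omega
      have e2 : n - (n + 1) = 0 := by omega
      rw [e1, e2]
      simp [Nat.choose_eq_zero_of_lt]
  rw [Finset.sum_congr rfl hsplit, Finset.sum_add_distrib]
  rw [Finset.sum_range_succ (n := n + 1)
    (f := fun k => if (n - k) % 2 = 1 then (n - k).choose k else 0)]
  have hz1 : (if (n - (n + 1)) % 2 = 1 then (n - (n + 1)).choose (n + 1) else 0) = 0 := by
    have : n - (n + 1) = 0 := by omega
    simp [this]
  rw [hz1, Nat.add_zero]
  rw [Finset.sum_range_succ (n := n + 1)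
    (f := fun k => if (n - k) % 2 = 1 then (n - k).choose (k + 1) else 0)]
  have hz2 : (if (n - (n + 1)) % 2 = 1 then (n - (n + 1)).choose (n + 1 + 1) else 0) = 0 := by
    have : n - (n + 1) = 0 := by omega
    simp [this]
  rw [hz2, Nat.add_zero]
  rw [Finset.sum_range_succ' (n := n + 1)
    (f := fun j => if (n + 1 - j) % 2 = 1 then (n + 1 - j).choose j else 0)]
  have hcng : ∀ k ∈ Finset.range (n + 1),
      (if (n + 1 - (k + 1)) % 2 = 1 then (n + 1 - (k + 1)).choose (k + 1) else 0)
      = (if (n - k) % 2 = 1 then (n - k).choose (k + 1) else 0) := by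
    intro k hk
    have e : n + 1 - (k + 1) = n - k := by omega
    rw [e]
  rw [Finset.sum_congr rfl hcng]
  have hfz : (if (n + 2 - 0) % 2 = 0 then (n + 2 - 0).choose 0 else 0)
      = (if (n + 1 - 0) % 2 = 1 then (n + 1 - 0).choose 0 else 0) := by
    simp only [Nat.sub_zero, Nat.choose_zero_right]
    have : (n + 2) % 2 = 0 ↔ (n + 1) % 2 = 1 := by omega
    by_cases hp : (n + 2) % 2 = 0
    · rw [if_pos hp, if_pos (this.mp hp)]
    · rw [if_neg hp, if_neg (fun h => hp (this.mpr h))]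
  rw [hfz]
  ring

lemma pvPair' (n : Nat) :
    (pvSoSum n : Int) + pvSe n = Nat.fib (n + 1) ∧ (pvSe n : Int) - pvSoSum n = pvSgn n := by
  induction n using Nat.strong_induction_on with
  | _ n IH =>
    match n with
    | 0 => constructor <;> simp [pvSoSum, pvSe, pvSgn]
    | 1 => constructor <;> simp [pvSoSum, pvSe, pvSgn, Finset.sum_range_succ]
    | n + 2 =>
      obtain ⟨h1a, h1b⟩ := IH (n + 1) (by omega)
      obtain ⟨h0a, h0b⟩ := IH n (by omega)
      rw [pvSo_rec', pvSe_rec']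
      constructor
      · have c1 : (Nat.fib (n + 2 + 1) : Int) = Nat.fib (n + 1 + 1) + Nat.fib (n + 1) := by
          have hN : Nat.fib (n + 2 + 1) = Nat.fib (n + 1) + Nat.fib (n + 1 + 1) :=
            Nat.fib_add_two (n := n + 1)
          push_cast [hN]
          ring
        push_cast
        omega
      · push_cast
        have hs : pvSgn (n + 2) = -(pvSgn (n + 1) + pvSgn n) := by
          unfold pvSgn
          have h3 : (n + 2) % 3 = (n % 3 + 2) % 3 := by omega
          have h4 : (n + 1) % 3 = (n % 3 + 1) % 3 := by omega
          have hm : n % 3 = 0 ∨ n % 3 = 1 ∨ n % 3 = 2 := by omega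
          rcases hm with h | h | h <;>
            rw [h3, h4, h] <;> norm_num
        rw [hs]
        omega

lemma pvFibPair_eq (k : Nat) : pvFibPair (k : Int) = ((Nat.fib k : Int), (Nat.fib (k + 1) : Int)) := by
  induction k using Nat.strong_induction_on with
  | _ k IH =>
    rw [pvFibPair]
    rcases Nat.eq_zero_or_pos k with hk | hk
    · subst hk; simp
    · have hk0 : ¬ ((k : Int) ≤ 0) := by omega
      simp only [hk0, dif_neg, not_false_iff]
      have hdiv : PySem.Int.floordiv (k : Int) 2 = ((k / 2 : Nat) : Int) := by
        rw [PySem.Int.floordiv_eq_ediv_of_pos (by omega)]; omega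
      rw [hdiv, IH (k / 2) (by omega)]
      have hle : Nat.fib (k / 2) ≤ 2 * Nat.fib (k / 2 + 1) := by
        have := Nat.fib_le_fib_succ (n := k / 2); omega
      have hc : ((Nat.fib (k/2) : Int)) * (2 * (Nat.fib (k/2 + 1) : Int) - Nat.fib (k/2))
          = (Nat.fib (2 * (k/2)) : Int) := by
        rw [Nat.fib_two_mul]; push_cast [hle]; ring
      have hd : ((Nat.fib (k/2) : Int)) * Nat.fib (k/2) + (Nat.fib (k/2+1) : Int) * Nat.fib (k/2+1)
          = (Nat.fib (2 * (k/2) + 1) : Int) := by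
        rw [Nat.fib_two_mul_add_one]; push_cast; ring
      have hmod : PySem.Int.mod (k : Int) 2 = ((k % 2 : Nat) : Int) := by
        rw [PySem.Int.mod_eq_emod_of_pos (by omega)]; omega
      rcases Nat.even_or_odd k with he | ho
      · have h2 : k % 2 = 0 := Nat.even_iff.mp he
        have hk2 : 2 * (k / 2) = k := by omega
        simp only [hmod, h2]
        simp only [Nat.cast_zero, if_true]
        refine Prod.ext ?_ ?_ <;> simp only []
        · rw [hc, hk2]
        · rw [hd, hk2]
      · have h2 : k % 2 = 1 := Nat.odd_iff.mp ho
        have hk2 : 2 * (k / 2) + 1 = k := by omega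
        simp only [hmod, h2]
        have : ((1:Nat):Int) ≠ 0 := by norm_num
        simp only [if_neg this]
        refine Prod.ext ?_ ?_ <;> simp only []
        · rw [hd, hk2]
        · rw [hc, hd, hk2]
          rw [show 2 * (k/2) = k - 1 from by omega]
          have : Nat.fib (k - 1) + Nat.fib k = Nat.fib (k + 1) := by
            rw [show k + 1 = (k - 1) + 2 from by omega, Nat.fib_add_two,
              show k - 1 + 1 = k from by omega]
          push_cast [← this]; ring

lemma pvFact_eq (n : Nat) :
    ((PySem.List.pyRange 1 (1 + (n : Int)) 1).foldl
      (fun acc i => acc ++ [PySem.List.pyGetD acc (-1) 0 * i]) [1])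
    = (List.range (n + 1)).map (fun i => ((Nat.factorial i : Nat) : Int)) := by
  induction n with
  | zero =>
    rw [PySem.List.pyRange_one_eq_nil (by norm_num)]
    simp [Nat.factorial]
  | succ n IH =>
    have hsplit : PySem.List.pyRange 1 (1 + ((n + 1 : Nat) : Int)) 1
        = PySem.List.pyRange 1 (1 + (n : Int)) 1 ++ [1 + (n : Int)] := by
      have := PySem.List.pyRange_one_succ_right (a := 1) (b := 1 + (n : Int)) (by omega)
      push_cast
      rw [show (1 : Int) + ((n : Int) + 1) = (1 + (n : Int)) + 1 from by ring]
      exact this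
    rw [hsplit, List.foldl_append, IH]
    rw [List.range_succ (n := n + 1), List.map_append]
    simp only [List.foldl_cons, List.foldl_nil]
    congr 1
    have hne : (List.range (n + 1)).map (fun i => ((Nat.factorial i : Nat) : Int)) ≠ [] := by
      simp [List.range_succ]
    rw [PySem.List.pyGetD_neg_one _ _ hne]
    have hlast : ((List.range (n + 1)).map (fun i => ((Nat.factorial i : Nat) : Int))).getLast hne
        = ((Nat.factorial n : Nat) : Int) := by
      have h1 : ((List.range (n + 1)).map (fun i => ((Nat.factorial i : Nat) : Int))).getLast?
          = some ((Nat.factorial n : Nat) : Int) := by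
        simp [List.range_succ]
      have h2 := List.getLast?_eq_some_getLast (l := (List.range (n + 1)).map (fun i => ((Nat.factorial i : Nat) : Int))) hne
      rw [h2] at h1
      exact Option.some.inj h1
    rw [hlast]
    simp [Nat.factorial_succ]
    ring

lemma pvChooseDiv (a b : Nat) :
    PySem.Int.floordiv ((Nat.factorial (a + b) : Int))
      ((Nat.factorial a : Int) * (Nat.factorial b : Int)) = ((a + b).choose b : Int) := by
  have h : (a + b).choose b * b.factorial * (a + b - b).factorial = (a + b).factorial :=
    Nat.choose_mul_factorial_mul_factorial (by omega)
  have h2 : ((a + b).factorial : Int) = ((a+b).choose b : Int) * ((a.factorial : Int) * (b.factorial : Int)) := by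
    rw [← h]; simp; ring
  rw [h2, PySem.Int.floordiv_eq_ediv_of_pos (by positivity), Int.mul_ediv_cancel]
  positivity

lemma pvFactGet (n k : Nat) (h : k ≤ n) :
    PySem.List.pyGetD ((List.range (n + 1)).map (fun i => ((Nat.factorial i : Nat) : Int))) (k : Int) 0
      = ((Nat.factorial k : Nat) : Int) := by
  rw [PySem.List.pyGetD_natCast]
  rw [List.getD_eq_getElem?_getD]
  simp [Nat.lt_succ_of_le h]

lemma pvModTwo (x : Nat) : (PySem.Int.mod ((x : Nat) : Int) 2 ≠ 0) ↔ x % 2 = 1 := by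
  rw [PySem.Int.mod_eq_emod_of_pos (by omega)]
  omega

lemma pvLoopA_eq (n : Nat) (oc tc : Nat) (h : oc + tc ≤ n) (total : Int) :
    pvLoopA ((List.range (n + 1)).map (fun i => ((Nat.factorial i : Nat) : Int))) (oc : Int) (tc : Int) total
      = total + (pvT oc tc : Int) := by
  induction oc using Nat.strong_induction_on generalizing tc total with
  | _ oc IH =>
    rw [pvLoopA]
    rw [dif_pos (by omega : (0:Int) ≤ (oc : Int))]
    have hsum : (oc : Int) + (tc : Int) = ((oc + tc : Nat) : Int) := by push_cast; ring
    have hget1 := pvFactGet n (oc + tc) h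
    have hget2 := pvFactGet n oc (by omega)
    have hget3 := pvFactGet n tc (by omega)
    have hdiv : PySem.Int.floordiv
        (PySem.List.pyGetD ((List.range (n + 1)).map (fun i => ((Nat.factorial i : Nat) : Int))) ((oc : Int) + (tc : Int)) 0)
        (PySem.List.pyGetD ((List.range (n + 1)).map (fun i => ((Nat.factorial i : Nat) : Int))) ((oc : Int)) 0
          * PySem.List.pyGetD ((List.range (n + 1)).map (fun i => ((Nat.factorial i : Nat) : Int))) ((tc : Int)) 0)
        = ((oc + tc).choose tc : Int) := by
      rw [hsum, hget1, hget2, hget3]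
      exact pvChooseDiv oc tc
    have hbody : (if PySem.Int.mod ((oc : Int) + (tc : Int)) 2 ≠ 0 then
        total + PySem.Int.floordiv
          (PySem.List.pyGetD ((List.range (n + 1)).map (fun i => ((Nat.factorial i : Nat) : Int))) ((oc : Int) + (tc : Int)) 0)
          (PySem.List.pyGetD ((List.range (n + 1)).map (fun i => ((Nat.factorial i : Nat) : Int))) ((oc : Int)) 0
            * PySem.List.pyGetD ((List.range (n + 1)).map (fun i => ((Nat.factorial i : Nat) : Int))) ((tc : Int)) 0)
      else total)
        = total + (if (oc + tc) % 2 = 1 then ((oc + tc).choose tc : Int) else 0) := by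
      rw [hsum]
      by_cases hp : (oc + tc) % 2 = 1
      · rw [if_pos ((pvModTwo (oc + tc)).mpr hp), if_pos hp, ← hsum, hdiv]
      · rw [if_neg (fun hh => hp ((pvModTwo (oc + tc)).mp hh)), if_neg hp, add_zero]
    simp only at hbody ⊢
    rw [hbody]
    match oc with
    | 0 =>
      rw [show ((0 : Nat) : Int) - 2 = (-2 : Int) from by norm_num, pvLoopA]
      rw [dif_neg (by norm_num)]
      simp [pvT, Nat.choose_self]
    | 1 =>
      rw [show ((1 : Nat) : Int) - 2 = (-1 : Int) from by norm_num, pvLoopA]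
      rw [dif_neg (by norm_num)]
      simp only [pvT]
      by_cases hp : (1 + tc) % 2 = 1
      · simp only [if_pos (by omega : (1 + tc) % 2 = 1)]
      · rw [if_neg (by omega : ¬ (1 + tc) % 2 = 1), if_neg (by omega : ¬ (1 + tc) % 2 = 1)]
        norm_num
    | oc + 2 =>
      have e1 : ((oc + 2 : Nat) : Int) - 2 = ((oc : Nat) : Int) := by push_cast; ring
      have e2 : ((tc : Nat) : Int) + 1 = ((tc + 1 : Nat) : Int) := by push_cast; ring
      rw [e1, e2, IH oc (by omega) (tc + 1) (by omega)]
      simp only [pvT]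
      push_cast
      ring_nf

-- ===== VERDICT (by name: the statement is the Claim_ definition above) =====
theorem count_combinations_spec : Claim_equal_count_combinations := by
  intro m _
  unfold Spec_count_combinations count_combinations count_combinations_alt
  by_cases h7 : m - 7 < 0
  · simp only [if_pos h7]
    rw [pvLoopA, dif_neg (by omega)]
  · simp only [if_neg h7]
    have hn : m - 7 = (((m - 7).toNat : Nat) : Int) := by omega
    set n : Nat := (m - 7).toNat with hdef
    have hm6 : m - 6 = 1 + (n : Int) := by omega
    -- A side
    have hA : pvLoopA ((PySem.List.pyRange 1 (m - 6) 1).foldl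
        (fun acc i => acc ++ [PySem.List.pyGetD acc (-1) 0 * i]) [1]) (m - 7) 0 0
        = (pvSoSum n : Int) := by
      rw [hm6, pvFact_eq n, hn]
      have h0 : ((0 : Nat) : Int) = (0 : Int) := rfl
      have := pvLoopA_eq n n 0 (by omega) 0
      rw [h0] at this
      rw [this, pvT_eq_soG, pvSo_eq_sum]
      ring
    rw [hA]
    -- B side
    have hfp : (pvFibPair (m - 7 + 1)).1 = (Nat.fib (n + 1) : Int) := by
      rw [hn, show ((n : Int) + 1) = ((n + 1 : Nat) : Int) from by push_cast; ring,
        pvFibPair_eq (n + 1)]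
    rw [hfp]
    have hmod3 : PySem.Int.mod (m - 7) 3 = ((n % 3 : Nat) : Int) := by
      rw [hn, PySem.Int.mod_eq_emod_of_pos (by omega)]
      omega
    rw [hmod3]
    have hs : (if ((n % 3 : Nat) : Int) = 0 then (1:Int) else if ((n % 3 : Nat) : Int) = 1 then -1 else 0)
        = pvSgn n := by
      unfold pvSgn
      have hm : n % 3 = 0 ∨ n % 3 = 1 ∨ n % 3 = 2 := by omega
      rcases hm with h | h | h <;> rw [h] <;> norm_num
    rw [hs]
    obtain ⟨ha, hb⟩ := pvPair' n
    have h2x : (Nat.fib (n + 1) : Int) - pvSgn n = 2 * (pvSoSum n : Int) := by omega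
    rw [h2x, PySem.Int.floordiv_eq_ediv_of_pos (by norm_num), Int.mul_ediv_cancel_left _ (by norm_num)]
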